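-- pv_equiv track=rewrite | github.com/ctoth/propstore | propstore/dung.py | _attackers_index
-- ===== SOURCE A (Python) =====
-- def _attackers_index(
--     defeats: frozenset[tuple[str, str]],
-- ) -> dict[str, frozenset[str]]:
--     """Build target -> attackers adjacency for a defeat relation."""
--     attackers: dict[str, set[str]] = {}
--     for attacker, target in defeats:
--         attackers.setdefault(target, set()).add(attacker)
--     return {
--         target: frozenset(sources)
--         for target, sources in attackers.items()
--     }
-- ===== SOURCE B (Python) =====
-- def _attackers_index(defeats):
--     """Build target -> attackers adjacency for a defeat relation."""
--     pairs = list(defeats)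
--     result = {}
--     for _, target in pairs:
--         if target not in result:
--             sources = []
--             for attacker, tgt in pairs:
--                 if tgt == target and attacker not in sources:
--                     sources.append(attacker)
--             result[target] = frozenset(sources)
--     return result
-- ===== Notes on version B (the rewrite author's own statement) =====
-- stated objective: alternative
-- what changed: B replaces A's single hash-accumulation pass (dict of mutable sets via setdefault) by a per-target decomposition: for each first-seen target it scans the pair list once, collecting that target's attackers directly.
import Mathlib
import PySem

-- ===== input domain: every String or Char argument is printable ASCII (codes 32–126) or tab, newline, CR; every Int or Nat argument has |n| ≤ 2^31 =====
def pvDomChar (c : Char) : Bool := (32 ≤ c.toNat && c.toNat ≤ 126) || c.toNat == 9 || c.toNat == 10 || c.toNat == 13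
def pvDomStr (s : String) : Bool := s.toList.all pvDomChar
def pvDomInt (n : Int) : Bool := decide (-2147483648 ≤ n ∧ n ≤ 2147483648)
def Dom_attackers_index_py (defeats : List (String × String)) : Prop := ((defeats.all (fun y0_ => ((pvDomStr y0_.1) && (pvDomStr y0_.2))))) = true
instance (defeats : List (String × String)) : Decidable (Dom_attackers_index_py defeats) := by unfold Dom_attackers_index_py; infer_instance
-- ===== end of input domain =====

-- B builds each target's attacker set by a per-target scan of the pair list instead of
-- A's single hash-accumulation pass ('alternative' decomposition, not faster).

-- ===== PORT A =====
-- attackers: dict[str, set[str]]; loop: attackers.setdefault(target, set()).add(attacker)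
-- (setdefault-then-mutate-in-place is exactly Dict.modify with default Set.empty)
def attackers_index_py (defeats : List (String × String)) : List (String × List String) :=
  let attackers : PySem.Dict String (PySem.Set String) :=
    defeats.foldl
      (fun d p => d.modify p.2 PySem.Set.empty (fun s => PySem.Set.add s p.1))
      PySem.Dict.empty
  attackers.items.map (fun kv => (kv.1, PySem.Set.ofList kv.2))

-- ===== PORT B =====
-- inner loop of B: collect attackers of `target` from `pairs`, first occurrences in order
def pvAltSources (pairs : List (String × String)) (target : String) : List String :=
  pairs.foldl
    (fun sources p =>
      if p.2 == target && !(sources.contains p.1) then sources ++ [p.1] else sources)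
    []

def attackers_index_py_alt (defeats : List (String × String)) : List (String × List String) :=
  defeats.foldl
    (fun result p =>
      if (result.map Prod.fst).contains p.2 then result
      else result ++ [(p.2, PySem.Set.ofList (pvAltSources defeats p.2))])
    []

-- ===== PRECONDITION & SPEC =====
def Spec_attackers_index_py (defeats : List (String × String)) (out : List (String × List String)) : Prop := out = attackers_index_py_alt defeats
instance (defeats : List (String × String)) (out : List (String × List String)) : Decidable (Spec_attackers_index_py defeats out) := by unfold Spec_attackers_index_py; infer_instance

-- ===== CLAIM (what is proved, stated in full; the proofs are below) =====
def Claim_equal_attackers_index_py : Prop := ∀ (defeats : List (String × String)), Dom_attackers_index_py defeats → Spec_attackers_index_py defeats (attackers_index_py defeats)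

-- ===== LEMMAS AND PROOFS =====

-- the inner fold of B with a general starting accumulator
def pvSourcesFrom (s : List String) (pairs : List (String × String)) (target : String) : List String :=
  pairs.foldl
    (fun sources p =>
      if p.2 == target && !(sources.contains p.1) then sources ++ [p.1] else sources)
    s

theorem pvAltSources_eq_from (pairs : List (String × String)) (t : String) :
    pvAltSources pairs t = pvSourcesFrom [] pairs t := rfl

-- A's accumulated value at key t is B's inner scan
theorem getD_foldA (L : List (String × String)) (d : PySem.Dict String (PySem.Set String))
    (t : String) :
    (L.foldl (fun d p => d.modify p.2 PySem.Set.empty (fun s => PySem.Set.add s p.1)) d).getD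
        t PySem.Set.empty
      = pvSourcesFrom (d.getD t PySem.Set.empty) L t := by
  induction L generalizing d with
  | nil => rfl
  | cons p L ih =>
      simp only [List.foldl_cons, pvSourcesFrom, ih]
      congr 1
      rw [PySem.Dict.getD_modify]
      by_cases h : t = p.2
      · subst h
        simp [PySem.Set.add]
      · have hb : (p.2 == t) = false := by simp [beq_eq_false_iff_ne]; exact fun e => h e.symm
        simp [h, hb]

-- B's outer fold, with a general accumulator whose entries are (t, f t)
theorem foldB (f : String → List String) (L : List (String × String))
    (acc : List (String × List String)) (seen : List String)
    (hseen : acc.map Prod.fst = seen) :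
    L.foldl
        (fun result p =>
          if (result.map Prod.fst).contains p.2 then result
          else result ++ [(p.2, f p.2)])
        acc
      = acc ++ ((PySem.Set.update seen (L.map Prod.snd)).drop seen.length).map
          (fun t => (t, f t)) := by
  induction L generalizing acc seen with
  | nil => simp [PySem.Set.update]
  | cons p L ih =>
      simp only [List.foldl_cons, List.map_cons, PySem.Set.update_cons]
      by_cases h : seen.contains p.2
      · have hmem : p.2 ∈ seen := by simpa using h
        have hadd : PySem.Set.add seen p.2 = seen := by simp [PySem.Set.add, hmem]
        rw [if_pos (hseen ▸ h), hadd, ih acc seen hseen]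
      · have hmem : p.2 ∉ seen := by simpa using h
        have hadd : PySem.Set.add seen p.2 = seen ++ [p.2] := by simp [PySem.Set.add, hmem]
        rw [if_neg (by rw [hseen]; exact h ∘ id), hadd,
          ih (acc ++ [(p.2, f p.2)]) (seen ++ [p.2]) (by simp [hseen])]
        have hpre : (PySem.Set.update (seen ++ [p.2]) (L.map Prod.snd)).take (seen ++ [p.2]).length
            = seen ++ [p.2] := by
          have := PySem.Set.update_eq_append_filter (s := seen ++ [p.2]) (xs := L.map Prod.snd)
          rw [this, List.take_append_of_le_length (le_refl _), List.take_length]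
        have hdrop : (PySem.Set.update (seen ++ [p.2]) (L.map Prod.snd)).drop seen.length
            = p.2 :: (PySem.Set.update (seen ++ [p.2]) (L.map Prod.snd)).drop (seen ++ [p.2]).length := by
          conv_lhs => rw [← List.take_append_drop (seen ++ [p.2]).length
            (PySem.Set.update (seen ++ [p.2]) (L.map Prod.snd))]
          rw [hpre, List.append_assoc, List.drop_left]
          simp
        rw [hdrop]
        simp

-- keys of A's dict = ordered-dedup of the targets
theorem keysA (L : List (String × String)) :
    (L.foldl (fun d p => d.modify p.2 PySem.Set.empty (fun s => PySem.Set.add s p.1))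
        (PySem.Dict.empty : PySem.Dict String (PySem.Set String))).keys
      = PySem.Set.ofList (L.map Prod.snd) := by
  have := PySem.Dict.keys_foldl_modify_key (l := L) (key := fun p : String × String => p.2)
    (d0 := (PySem.Set.empty : PySem.Set String))
    (f := fun _ p s => PySem.Set.add s p.1) (d := PySem.Dict.empty)
  simpa [PySem.Set.update_nil_left, PySem.Dict.keys_empty] using this

theorem nodup_keysA (L : List (String × String)) :
    (L.foldl (fun d p => d.modify p.2 PySem.Set.empty (fun s => PySem.Set.add s p.1))
        (PySem.Dict.empty : PySem.Dict String (PySem.Set String))).keys.Nodup := by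
  rw [keysA]; exact PySem.Set.nodup_ofList _

-- ===== VERDICT (by name: the statement is the Claim_ definition above) =====
theorem attackers_index_py_spec : Claim_equal_attackers_index_py := by
  intro L _
  show attackers_index_py L = attackers_index_py_alt L
  simp only [attackers_index_py, attackers_index_py_alt]
  rw [PySem.Dict.items_eq_map_keys _ (nodup_keysA L) PySem.Set.empty, keysA,
    foldB (fun t => PySem.Set.ofList (pvAltSources L t)) L [] [] rfl]
  simp only [List.map_map, List.nil_append, PySem.Set.update_nil_left]
  refine List.map_congr_left fun t ht => ?_
  simp only [Function.comp]
  rw [getD_foldA, PySem.Dict.getD_empty, pvAltSources_eq_from]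
  rfl
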